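-- pv_equiv track=rewrite | github.com/ProjetPP/PPP-QuestionParsing-ML-Standalone | ppp_questionparsing_ml_standalone/dataset.py | compute_occurrences_sentence
-- ===== SOURCE A (Python) =====
-- def compute_occurrences_sentence(words_sentence):
--     words_occurrences = {}
--     output = []
--
--     for w in words_sentence:
--         if w in words_occurrences:
--             words_occurrences[w] += 1
--         else:
--             words_occurrences[w] = 1
--         output.append((w, words_occurrences[w]))
--
--     return output
-- ===== SOURCE B (Python) =====
-- def compute_occurrences_sentence(words_sentence):
--     words = list(words_sentence)
--     totals = {}
--     for w in words:
--         totals[w] = totals.get(w, 0) + 1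
--     out = []
--     for w in reversed(words):
--         out.append((w, totals[w]))
--         totals[w] -= 1
--     out.reverse()
--     return out
-- ===== Notes on version B (the rewrite author's own statement) =====
-- stated objective: alternative
-- what changed: Replaces A's single forward pass with an incrementing running-count dict by two staged passes: first compute the total count of every word, then traverse the list in reverse emitting the current total and decrementing it, finally reversing the output (running count = total minus occurrences after the position).
import Mathlib
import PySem

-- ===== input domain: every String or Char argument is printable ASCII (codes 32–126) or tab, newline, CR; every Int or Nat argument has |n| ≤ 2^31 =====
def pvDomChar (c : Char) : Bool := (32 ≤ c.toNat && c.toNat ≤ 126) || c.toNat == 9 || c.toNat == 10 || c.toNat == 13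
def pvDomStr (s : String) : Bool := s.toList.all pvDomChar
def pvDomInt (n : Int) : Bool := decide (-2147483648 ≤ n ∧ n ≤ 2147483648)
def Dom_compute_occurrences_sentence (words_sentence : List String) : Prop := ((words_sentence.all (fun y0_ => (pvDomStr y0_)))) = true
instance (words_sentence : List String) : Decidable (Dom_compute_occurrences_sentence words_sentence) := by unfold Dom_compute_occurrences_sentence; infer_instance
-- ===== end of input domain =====

-- B replaces A's single incrementing-dict pass by two staged passes (total counts, then a reverse
-- traversal emitting and decrementing the totals, then reversing the output); same cost, alternative structure.

-- ===== PORT A =====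
-- the for-loop over words_sentence, with state (words_occurrences, output)
def compute_occurrences_sentence (words_sentence : List String) : List (String × Int) :=
  (words_sentence.foldl
    (fun s w =>
      let occ : PySem.Dict String Int :=
        if s.1.contains w then s.1.insert w (s.1.getD w 0 + 1) else s.1.insert w 1
      (occ, s.2 ++ [(w, occ.getD w 0)]))
    ((PySem.Dict.empty : PySem.Dict String Int), ([] : List (String × Int)))).2

-- ===== PORT B =====
-- pass 1: totals[w] = totals.get(w, 0) + 1; pass 2: for w in reversed(words): emit (w, totals[w]); totals[w] -= 1; out.reverse()
-- totals[w] in pass 2 is a plain index, exact here via getD since every w of the list is a key of totals (proved below)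
def compute_occurrences_sentence_alt (words_sentence : List String) : List (String × Int) :=
  let totals := words_sentence.foldl (fun d w => d.insert w (d.getD w 0 + 1))
      (PySem.Dict.empty : PySem.Dict String Int)
  let r := words_sentence.reverse.foldl
      (fun s w => (s.1 ++ [(w, s.2.getD w 0)], s.2.insert w (s.2.getD w 0 - 1)))
      (([] : List (String × Int)), totals)
  r.1.reverse

-- ===== PRECONDITION & SPEC =====
def Spec_compute_occurrences_sentence (words_sentence : List String) (out : List (String × Int)) : Prop := out = compute_occurrences_sentence_alt words_sentence
instance (words_sentence : List String) (out : List (String × Int)) : Decidable (Spec_compute_occurrences_sentence words_sentence out) := by unfold Spec_compute_occurrences_sentence; infer_instance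

-- ===== CLAIM (what is proved, stated in full; the proofs are below) =====
def Claim_equal_compute_occurrences_sentence : Prop := ∀ (words_sentence : List String), Dom_compute_occurrences_sentence words_sentence → Spec_compute_occurrences_sentence words_sentence (compute_occurrences_sentence words_sentence)

-- ===== LEMMAS AND PROOFS =====

-- canonical result: the (word, running count) list for `rest` when `pre` has already been seen
def pvCanon (pre rest : List String) : List (String × Int) :=
  match rest with
  | [] => []
  | w :: t => (w, ((pre.count w : Int) + 1)) :: pvCanon (pre ++ [w]) t

lemma count_append_singleton_ne (pre : List String) (v w : String) (hv : ¬ v = w) :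
    (pre ++ [w]).count v = pre.count v := by
  have h0 : List.count v [w] = 0 := List.count_eq_zero.mpr (by simp [hv])
  rw [List.count_append, h0, Nat.add_zero]

lemma canon_append (rest pre : List String) (w : String) :
    pvCanon pre (rest ++ [w]) = pvCanon pre rest ++ [(w, ((pre ++ rest).count w : Int) + 1)] := by
  induction rest generalizing pre with
  | nil => simp [pvCanon]
  | cons x t ih =>
    simp only [List.cons_append, pvCanon, ih (pre ++ [x]), List.append_assoc,
      List.nil_append]

-- invariant proof for A's loop
lemma loop_canon (rest : List String) (pre : List String) (d : PySem.Dict String Int)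
    (out : List (String × Int))
    (hd : ∀ v, d.get? v = if v ∈ pre then some ((pre.count v : Int)) else none) :
    (rest.foldl
      (fun s w =>
        let occ : PySem.Dict String Int :=
          if s.1.contains w then s.1.insert w (s.1.getD w 0 + 1) else s.1.insert w 1
        (occ, s.2 ++ [(w, occ.getD w 0)]))
      (d, out)).2 = out ++ pvCanon pre rest := by
  induction rest generalizing pre d out with
  | nil => simp [pvCanon]
  | cons w t ih =>
    have hkey : ∀ (x : Int), ((d.insert w x).getD w 0) = x := by
      intro x; rw [PySem.Dict.getD_insert]; simp
    by_cases hmem : w ∈ pre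
    · have hc : d.contains w = true := by
        rw [PySem.Dict.contains_eq_isSome_get?, hd w]; simp [hmem]
      have hgd : d.getD w 0 = (pre.count w : Int) := by
        rw [PySem.Dict.getD_eq_get?_getD, hd w]; simp [hmem]
      have hd' : ∀ v, (d.insert w (d.getD w 0 + 1)).get? v
          = if v ∈ pre ++ [w] then some (((pre ++ [w]).count v : Int)) else none := by
        intro v
        rw [PySem.Dict.get?_insert, hd v]
        by_cases hv : v = w
        · subst hv
          simp [hgd, List.count_append, hmem]
        · rw [count_append_singleton_ne pre v w hv]
          simp [hv]
      simp only [List.foldl_cons, hc, if_true]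
      rw [ih (pre ++ [w]) _ _ hd']
      simp [pvCanon, hkey, hgd]
    · have hc : d.contains w = false := by
        rw [PySem.Dict.contains_eq_isSome_get?, hd w]; simp [hmem]
      have hd' : ∀ v, (d.insert w 1).get? v
          = if v ∈ pre ++ [w] then some (((pre ++ [w]).count v : Int)) else none := by
        intro v
        rw [PySem.Dict.get?_insert, hd v]
        by_cases hv : v = w
        · subst hv
          simp [List.count_append, List.count_eq_zero_of_not_mem hmem, hmem]
        · rw [count_append_singleton_ne pre v w hv]
          simp [hv]
      simp only [List.foldl_cons, hc, Bool.false_eq_true, if_false]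
      rw [ih (pre ++ [w]) _ _ hd']
      simp [pvCanon, hkey, List.count_eq_zero_of_not_mem hmem]

-- invariant proof for B's second (reverse) loop: totals hold the count in the prefix still to emit
lemma loopB (l : List String) (d : PySem.Dict String Int) (out : List (String × Int))
    (hd : ∀ v ∈ l, d.get? v = some ((l.reverse.count v : Int))) :
    (l.foldl (fun s w => (s.1 ++ [(w, s.2.getD w 0)], s.2.insert w (s.2.getD w 0 - 1))) (out, d)).1
      = out ++ (pvCanon [] l.reverse).reverse := by
  induction l generalizing d out with
  | nil => simp [pvCanon]
  | cons w t ih =>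
    have hw := hd w (by simp)
    have hgd : d.getD w 0 = (((w :: t).reverse.count w : Int)) := by
      rw [PySem.Dict.getD_eq_get?_getD, hw]; rfl
    have hcnt : ((w :: t).reverse.count w) = t.reverse.count w + 1 := by
      simp [List.count_append]
    have hd' : ∀ v ∈ t, (d.insert w (d.getD w 0 - 1)).get? v = some ((t.reverse.count v : Int)) := by
      intro v hv
      rw [PySem.Dict.get?_insert]
      by_cases hvw : v = w
      · subst hvw
        rw [if_pos rfl, hgd, hcnt]
        congr 1; push_cast; ring
      · rw [if_neg hvw, hd v (by simp [hv])]
        have : (w :: t).reverse.count v = t.reverse.count v := by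
          simpa using count_append_singleton_ne t.reverse v w hvw
        rw [this]
    simp only [List.foldl_cons]
    rw [ih _ _ hd']
    have hcanon : pvCanon [] (w :: t).reverse = pvCanon [] t.reverse ++ [(w, (t.reverse.count w : Int) + 1)] := by
      have := canon_append t.reverse [] w
      simpa using this
    rw [hcanon, hgd, hcnt]
    simp only [List.reverse_append, List.reverse_singleton, List.singleton_append,
      List.append_assoc]
    push_cast
    rfl

lemma alt_eq (ws : List String) : compute_occurrences_sentence_alt ws = pvCanon [] ws := by
  unfold compute_occurrences_sentence_alt
  have htot : ws.foldl (fun d w => d.insert w (d.getD w 0 + 1))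
      (PySem.Dict.empty : PySem.Dict String Int) = PySem.Dict.counter ws :=
    PySem.Dict.foldl_insert_getD_add_one_eq_counter ws
  rw [htot]
  have hget : ∀ v ∈ ws.reverse, (PySem.Dict.counter ws).get? v = some ((ws.reverse.reverse.count v : Int)) := by
    intro v hv
    have hvmem : v ∈ ws := by simpa using hv
    have hc : (PySem.Dict.counter ws).contains v = true := by
      rw [PySem.Dict.contains_counter]; simpa using hvmem
    have hs : ((PySem.Dict.counter ws).get? v).isSome := by
      rw [← PySem.Dict.contains_eq_isSome_get?]; exact hc
    obtain ⟨x, hx⟩ := Option.isSome_iff_exists.mp hs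
    have hgd := PySem.Dict.getD_counter (xs := ws) (v := v)
    rw [PySem.Dict.getD_eq_get?_getD, hx] at hgd
    simp only [Option.getD_some] at hgd
    rw [hx, hgd]
    simp
  show (ws.reverse.foldl (fun s w => (s.1 ++ [(w, s.2.getD w 0)], s.2.insert w (s.2.getD w 0 - 1)))
      (([] : List (String × Int)), PySem.Dict.counter ws)).1.reverse = pvCanon [] ws
  rw [loopB ws.reverse (PySem.Dict.counter ws) [] hget]
  simp

-- ===== VERDICT (by name: the statement is the Claim_ definition above) =====
theorem compute_occurrences_sentence_spec : Claim_equal_compute_occurrences_sentence := by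
  intro ws _
  show compute_occurrences_sentence ws = compute_occurrences_sentence_alt ws
  rw [alt_eq]
  unfold compute_occurrences_sentence
  have := loop_canon ws [] (PySem.Dict.empty : PySem.Dict String Int) []
    (by intro v; simp [PySem.Dict.get?_empty])
  simpa using this
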